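-- pv_equiv track=rewrite | github.com/guilopgar/TumorMorphNER | nlp_utils.py | ss_fragment_greedy_ner
-- ===== SOURCE A (Python) =====
-- def ss_fragment_greedy_ner(ss_token, ss_start_end, ss_labels, ss_word_id, max_seq_len):
--     """
--     Implementation of the multiple-sentence fine-tuning approach developed in http://ceur-ws.org/Vol-2664/cantemist_paper15.pdf,
--     which consists in generating text fragments containing the maximum number of adjacent split sentences, such that the length of
--     each fragment is <= max_seq_len.
--     """
--
--     frag_token, frag_start_end, frag_labels, frag_word_id = [[]], [[]], [[]], [[]]
--     i = 0
--     while i < len(ss_token):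
--         assert len(ss_token[i]) <= max_seq_len
--         if len(frag_token[-1]) + len(ss_token[i]) > max_seq_len:
--             # Fragment is full, so create a new empty fragment
--             frag_token.append([])
--             frag_start_end.append([])
--             frag_labels.append([])
--             frag_word_id.append([])
--
--         frag_token[-1].extend(ss_token[i])
--         frag_start_end[-1].extend(ss_start_end[i])
--         frag_labels[-1].extend(ss_labels[i])
--         frag_word_id[-1].extend(ss_word_id[i])
--         i += 1
--
--     return frag_token, frag_start_end, frag_labels, frag_word_id
-- ===== SOURCE B (Python) =====
-- def ss_fragment_greedy_ner(ss_token, ss_start_end, ss_labels, ss_word_id, max_seq_len):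
--     # Two-phase re-implementation: first assign sentence indices to fragment
--     # groups with a running length counter, then concatenate each group's
--     # sublists from every parallel input list.
--     groups = [[]]
--     cur = 0
--     for i, sent in enumerate(ss_token):
--         assert len(sent) <= max_seq_len
--         if cur + len(sent) > max_seq_len:
--             groups.append([])
--             cur = 0
--         groups[-1].append(i)
--         cur += len(sent)
--
--     def gather(xs):
--         return [[x for i in g for x in xs[i]] for g in groups]
--
--     return gather(ss_token), gather(ss_start_end), gather(ss_labels), gather(ss_word_id)
-- ===== Notes on version B (the rewrite author's own statement) =====
-- stated objective: alternative
-- what changed: Replaces A's single pass that mutates the last fragment of four parallel output lists with a two-phase decomposition: a first pass over sentence lengths assigns each sentence index to a fragment group, then a second phase concatenates each group's sublists from the four inputs.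
import Mathlib
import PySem

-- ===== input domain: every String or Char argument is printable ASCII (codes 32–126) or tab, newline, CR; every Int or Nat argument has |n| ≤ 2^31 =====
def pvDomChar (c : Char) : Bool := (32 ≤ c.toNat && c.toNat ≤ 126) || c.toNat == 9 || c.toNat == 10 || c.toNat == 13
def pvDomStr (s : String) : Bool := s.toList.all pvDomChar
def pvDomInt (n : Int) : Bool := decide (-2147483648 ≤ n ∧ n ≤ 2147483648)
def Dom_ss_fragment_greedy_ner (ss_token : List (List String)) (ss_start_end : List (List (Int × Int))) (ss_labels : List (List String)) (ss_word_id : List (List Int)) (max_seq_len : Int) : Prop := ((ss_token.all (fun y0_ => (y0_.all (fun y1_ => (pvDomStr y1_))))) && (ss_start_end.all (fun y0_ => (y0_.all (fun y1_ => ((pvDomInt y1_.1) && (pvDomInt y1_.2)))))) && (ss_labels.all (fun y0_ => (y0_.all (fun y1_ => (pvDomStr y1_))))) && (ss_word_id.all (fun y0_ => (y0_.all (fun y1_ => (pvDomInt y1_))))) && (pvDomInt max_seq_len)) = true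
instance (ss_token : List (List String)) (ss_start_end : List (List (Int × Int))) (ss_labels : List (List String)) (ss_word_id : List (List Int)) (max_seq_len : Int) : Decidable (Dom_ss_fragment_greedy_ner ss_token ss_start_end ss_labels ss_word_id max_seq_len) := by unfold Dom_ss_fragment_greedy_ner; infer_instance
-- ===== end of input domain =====

-- B replaces A's single mutating pass with a two-phase decomposition (index grouping, then gathering); same cost.
-- ===== PORT A =====
-- A-side helper: frag[-1].extend(x)
def pvExtendLast {a : Type} (l : List (List a)) (x : List a) : List (List a) :=
  l.dropLast ++ [l.getLastD [] ++ x]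

-- A's loop body (the `assert len(ss_token[i]) <= max_seq_len` raises in Python; those inputs are outside Pre_)
def pvStepA (ss_token : List (List String)) (ss_start_end : List (List (Int × Int))) (ss_labels : List (List String)) (ss_word_id : List (List Int)) (max_seq_len : Int)
    (st : List (List String) × (List (List (Int × Int))) × List (List String) × List (List Int)) (i : Int) :
    List (List String) × (List (List (Int × Int))) × List (List String) × List (List Int) :=
  let t := PySem.List.pyGetD ss_token i []
  let st :=
    if ((st.1.getLastD []).length : Int) + (t.length : Int) > max_seq_len then
      (st.1 ++ [[]], st.2.1 ++ [[]], st.2.2.1 ++ [[]], st.2.2.2 ++ [[]])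
    else st
  (pvExtendLast st.1 t,
   pvExtendLast st.2.1 (PySem.List.pyGetD ss_start_end i []),
   pvExtendLast st.2.2.1 (PySem.List.pyGetD ss_labels i []),
   pvExtendLast st.2.2.2 (PySem.List.pyGetD ss_word_id i []))

def ss_fragment_greedy_ner (ss_token : List (List String)) (ss_start_end : List (List (Int × Int))) (ss_labels : List (List String)) (ss_word_id : List (List Int)) (max_seq_len : Int) : List (List String) × (List (List (Int × Int))) × List (List String) × List (List Int) :=
  (PySem.List.pyRange 0 (ss_token.length : Int) 1).foldl
    (pvStepA ss_token ss_start_end ss_labels ss_word_id max_seq_len)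
    ([[]], [[]], [[]], [[]])

-- ===== PORT B =====
-- B-side helper: phase-1 loop body over enumerate(ss_token): grow the index groups
def pvStepB (max_seq_len : Int) (st : List (List Int) × Int) (p : Int × List String) : List (List Int) × Int :=
  let gs := if st.2 + (p.2.length : Int) > max_seq_len then st.1 ++ [[]] else st.1
  let cur := if st.2 + (p.2.length : Int) > max_seq_len then (0 : Int) else st.2
  (gs.dropLast ++ [gs.getLastD [] ++ [p.1]], cur + (p.2.length : Int))

-- B-side helper: [x for i in g for x in xs[i]]
def pvGather {a : Type} (xs : List (List a)) (g : List Int) : List a :=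
  g.flatMap (fun i => PySem.List.pyGetD xs i [])

def ss_fragment_greedy_ner_alt (ss_token : List (List String)) (ss_start_end : List (List (Int × Int))) (ss_labels : List (List String)) (ss_word_id : List (List Int)) (max_seq_len : Int) : List (List String) × (List (List (Int × Int))) × List (List String) × List (List Int) :=
  let groups := ((PySem.List.enumerate ss_token).foldl (pvStepB max_seq_len) ([[]], 0)).1
  (groups.map (fun g => pvGather ss_token g),
   groups.map (fun g => pvGather ss_start_end g),
   groups.map (fun g => pvGather ss_labels g),
   groups.map (fun g => pvGather ss_word_id g))

-- ===== PRECONDITION & SPEC =====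
-- Pre_ excludes exactly the inputs where Python A raises: a sentence longer than max_seq_len
-- (AssertionError) or a parallel list shorter than ss_token (IndexError).
def Pre_ss_fragment_greedy_ner (ss_token : List (List String)) (ss_start_end : List (List (Int × Int))) (ss_labels : List (List String)) (ss_word_id : List (List Int)) (max_seq_len : Int) : Prop :=
  (∀ s ∈ ss_token, (s.length : Int) ≤ max_seq_len) ∧
  ss_token.length ≤ ss_start_end.length ∧ ss_token.length ≤ ss_labels.length ∧ ss_token.length ≤ ss_word_id.length
instance (ss_token : List (List String)) (ss_start_end : List (List (Int × Int))) (ss_labels : List (List String)) (ss_word_id : List (List Int)) (max_seq_len : Int) : Decidable (Pre_ss_fragment_greedy_ner ss_token ss_start_end ss_labels ss_word_id max_seq_len) := by unfold Pre_ss_fragment_greedy_ner; infer_instance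

def pvWitness_ss_fragment_greedy_ner : List (List String) × (List (List (Int × Int))) × List (List String) × List (List Int) × Int :=
  ([["a"], ["bb", "c"]], [[(0, 1)], [(1, 3), (3, 4)]], [["O"], ["B", "O"]], [[0], [1, 2]], 2)

def Spec_ss_fragment_greedy_ner (ss_token : List (List String)) (ss_start_end : List (List (Int × Int))) (ss_labels : List (List String)) (ss_word_id : List (List Int)) (max_seq_len : Int) (out : List (List String) × (List (List (Int × Int))) × List (List String) × List (List Int)) : Prop := out = ss_fragment_greedy_ner_alt ss_token ss_start_end ss_labels ss_word_id max_seq_len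
instance (ss_token : List (List String)) (ss_start_end : List (List (Int × Int))) (ss_labels : List (List String)) (ss_word_id : List (List Int)) (max_seq_len : Int) (out : List (List String) × (List (List (Int × Int))) × List (List String) × List (List Int)) : Decidable (Spec_ss_fragment_greedy_ner ss_token ss_start_end ss_labels ss_word_id max_seq_len out) := by unfold Spec_ss_fragment_greedy_ner; infer_instance

-- ===== CLAIM (what is proved, stated in full; the proofs are below) =====
def Claim_equal_ss_fragment_greedy_ner : Prop := ∀ (ss_token : List (List String)) (ss_start_end : List (List (Int × Int))) (ss_labels : List (List String)) (ss_word_id : List (List Int)) (max_seq_len : Int), Dom_ss_fragment_greedy_ner ss_token ss_start_end ss_labels ss_word_id max_seq_len → Pre_ss_fragment_greedy_ner ss_token ss_start_end ss_labels ss_word_id max_seq_len → Spec_ss_fragment_greedy_ner ss_token ss_start_end ss_labels ss_word_id max_seq_len (ss_fragment_greedy_ner ss_token ss_start_end ss_labels ss_word_id max_seq_len)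

-- ===== LEMMAS AND PROOFS =====

-- the 4-tuple of fragment lists B builds from a list of index groups
def pvMapSt (tok : List (List String)) (sse : List (List (Int × Int))) (lab : List (List String)) (wid : List (List Int)) (gs : List (List Int)) :
    List (List String) × (List (List (Int × Int))) × List (List String) × List (List Int) :=
  (gs.map (fun g => pvGather tok g), gs.map (fun g => pvGather sse g),
   gs.map (fun g => pvGather lab g), gs.map (fun g => pvGather wid g))

lemma pvGather_append_singleton {a : Type} (xs : List (List a)) (g : List Int) (i : Int) :
    pvGather xs (g ++ [i]) = pvGather xs g ++ PySem.List.pyGetD xs i [] := by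
  simp [pvGather]

lemma getLastD_map_gather {a : Type} (xs : List (List a)) (gs : List (List Int)) (h : gs ≠ []) :
    (gs.map (fun g => pvGather xs g)).getLastD [] = pvGather xs (gs.getLastD []) := by
  rw [List.getLastD_eq_getLast?, List.getLastD_eq_getLast?, List.getLast?_map]
  cases hg : gs.getLast? with
  | none => exact absurd (List.getLast?_eq_none_iff.mp hg) h
  | some g => rfl

-- one loop step: A's mutation of the last fragments simulates B's index grouping
lemma pvStep_sim (tok : List (List String)) (sse : List (List (Int × Int))) (lab : List (List String)) (wid : List (List Int)) (mx : Int) (i : Int)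
    (gs : List (List Int)) (cur : Int) (h : gs ≠ [])
    (hcur : cur = ((pvGather tok (gs.getLastD [])).length : Int)) :
    pvStepA tok sse lab wid mx (pvMapSt tok sse lab wid gs) i
        = pvMapSt tok sse lab wid (pvStepB mx (gs, cur) (i, PySem.List.pyGetD tok i [])).1
      ∧ (pvStepB mx (gs, cur) (i, PySem.List.pyGetD tok i [])).1 ≠ []
      ∧ (pvStepB mx (gs, cur) (i, PySem.List.pyGetD tok i [])).2
          = ((pvGather tok (((pvStepB mx (gs, cur) (i, PySem.List.pyGetD tok i [])).1).getLastD [])).length : Int) := by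
  simp only [pvStepA, pvStepB, pvMapSt]
  rw [getLastD_map_gather tok gs h, ← hcur]
  by_cases hc : cur + ((PySem.List.pyGetD tok i []).length : Int) > mx
  · simp only [if_pos hc]
    refine ⟨?_, by simp, ?_⟩
    · simp [pvExtendLast, pvGather]
    · simp [pvGather]
  · simp only [if_neg hc]
    refine ⟨?_, by simp, ?_⟩
    · simp only [pvExtendLast, List.map_append, List.map_dropLast, List.map_cons, List.map_nil,
        getLastD_map_gather tok gs h, getLastD_map_gather sse gs h,
        getLastD_map_gather lab gs h, getLastD_map_gather wid gs h,
        pvGather_append_singleton]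
    · rw [List.getLastD_concat, pvGather_append_singleton, hcur]
      simp [List.length_append]

lemma pvFold_sim (tok : List (List String)) (sse : List (List (Int × Int))) (lab : List (List String)) (wid : List (List Int)) (mx : Int) (l : List Int) :
    ∀ (gs : List (List Int)) (cur : Int), gs ≠ [] →
    cur = ((pvGather tok (gs.getLastD [])).length : Int) →
    l.foldl (pvStepA tok sse lab wid mx) (pvMapSt tok sse lab wid gs)
      = pvMapSt tok sse lab wid
          ((l.foldl (fun st j => pvStepB mx st (j, PySem.List.pyGetD tok j [])) (gs, cur)).1) := by
  induction l with
  | nil => intro gs cur _ _; rfl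
  | cons i l ih =>
    intro gs cur h hcur
    obtain ⟨e1, e2, e3⟩ := pvStep_sim tok sse lab wid mx i gs cur h hcur
    simp only [List.foldl_cons, e1]
    exact ih _ _ e2 e3

-- ===== VERDICT (by name: the statement is the Claim_ definition above) =====
theorem ss_fragment_greedy_ner_spec : Claim_equal_ss_fragment_greedy_ner := by
  intro tok sse lab wid mx _ _
  unfold Spec_ss_fragment_greedy_ner ss_fragment_greedy_ner ss_fragment_greedy_ner_alt
  rw [PySem.List.enumerate_eq_map_pyRange tok [], PySem.List.len_eq, List.foldl_map]
  have h := pvFold_sim tok sse lab wid mx (PySem.List.pyRange 0 (tok.length : Int) 1)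
    [[]] 0 (by simp) (by simp [pvGather])
  simpa [pvMapSt, pvGather] using h
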